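-- pv_equiv track=rewrite | github.com/Eric-Lautanen/ClippysRevenge | generate_frontier.py | make_cargo_toml
-- ===== SOURCE A (Python) =====
-- EDITION      = "2021"
--
-- CRATE_MAP: dict[str, str] = {
--     "tokio":              'tokio = { version = "1", features = ["full"] }',
--     "tokio_util":         'tokio-util = { version = "0.7", features = ["full"] }',
--     "tokio_stream":       'tokio-stream = "0.1"',
--     "futures":            'futures = "0.3"',
--     "futures_util":       'futures-util = "0.3"',
--     "async_trait":        'async-trait = "0.1"',
--     "pin_project":        'pin-project = "1"',
--     "pin_project_lite":   'pin-project-lite = "0.2"',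
--     "serde":              'serde = { version = "1", features = ["derive"] }',
--     "serde_json":         'serde_json = "1"',
--     "serde_derive":       'serde_derive = "1"',
--     "thiserror":          'thiserror = "2"',
--     "anyhow":             'anyhow = "1"',
--     "rayon":              'rayon = "1"',
--     "crossbeam":          'crossbeam = "0.8"',
--     "crossbeam_channel":  'crossbeam-channel = "0.5"',
--     "crossbeam_utils":    'crossbeam-utils = "0.8"',
--     "parking_lot":        'parking_lot = "0.12"',
--     "dashmap":            'dashmap = "6"',
--     "once_cell":          'once_cell = "1"',
--     "lazy_static":        'lazy_static = "1"',
--     "rand":               'rand = "0.8"',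
--     "rand_core":          'rand_core = "0.6"',
--     "regex":              'regex = "1"',
--     "tracing":            'tracing = "0.1"',
--     "tracing_subscriber": 'tracing-subscriber = { version = "0.3", features = ["env-filter"] }',
--     "log":                'log = "0.4"',
--     "env_logger":         'env_logger = "0.11"',
--     "tower":              'tower = { version = "0.4", features = ["full"] }',
--     "tower_service":      'tower = { version = "0.4", features = ["full"] }',
--     "tower_layer":        'tower = { version = "0.4", features = ["full"] }',
--     "hyper":              'hyper = { version = "1", features = ["full"] }',
--     "axum":               'axum = "0.7"',
--     "reqwest":            'reqwest = { version = "0.12", features = ["json"] }',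
--     "bytes":              'bytes = "1"',
--     "byteorder":          'byteorder = "1"',
--     "itertools":          'itertools = "0.13"',
--     "num_traits":         'num-traits = "0.2"',
--     "num_derive":         'num-derive = "0.4"',
--     "indexmap":           'indexmap = "2"',
--     "typed_arena":        'typed-arena = "2"',
--     "derive_more":        'derive_more = { version = "1", features = ["full"] }',
--     "strum":              'strum = { version = "0.26", features = ["derive"] }',
--     "strum_macros":       'strum = { version = "0.26", features = ["derive"] }',
--     "clap":               'clap = { version = "4", features = ["derive"] }',
--     "chrono":             'chrono = "0.4"',
--     "uuid":               'uuid = { version = "1", features = ["v4"] }',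
--     "libc":               'libc = "0.2"',
-- }
--
-- def make_cargo_toml(crates: list[str]) -> str:
--     lines = [
--         '[package]',
--         'name = "rust-example"',
--         'version = "0.1.0"',
--         f'edition = "{EDITION}"',
--         '',
--         '[dependencies]',
--     ]
--     for crate in sorted(set(crates)):
--         if crate in CRATE_MAP:
--             lines.append(CRATE_MAP[crate])
--     return "\n".join(lines) + "\n"
-- ===== SOURCE B (Python) =====
-- EDITION = "2021"
--
-- # The dependency table restructured: pre-sorted (key, crate-name, version, features)
-- # rows; the Cargo.toml line for each row is rendered by _dep_line.
-- DEPS = [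
--     ('anyhow', 'anyhow', '1', []),
--     ('async_trait', 'async-trait', '0.1', []),
--     ('axum', 'axum', '0.7', []),
--     ('byteorder', 'byteorder', '1', []),
--     ('bytes', 'bytes', '1', []),
--     ('chrono', 'chrono', '0.4', []),
--     ('clap', 'clap', '4', ['derive']),
--     ('crossbeam', 'crossbeam', '0.8', []),
--     ('crossbeam_channel', 'crossbeam-channel', '0.5', []),
--     ('crossbeam_utils', 'crossbeam-utils', '0.8', []),
--     ('dashmap', 'dashmap', '6', []),
--     ('derive_more', 'derive_more', '1', ['full']),
--     ('env_logger', 'env_logger', '0.11', []),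
--     ('futures', 'futures', '0.3', []),
--     ('futures_util', 'futures-util', '0.3', []),
--     ('hyper', 'hyper', '1', ['full']),
--     ('indexmap', 'indexmap', '2', []),
--     ('itertools', 'itertools', '0.13', []),
--     ('lazy_static', 'lazy_static', '1', []),
--     ('libc', 'libc', '0.2', []),
--     ('log', 'log', '0.4', []),
--     ('num_derive', 'num-derive', '0.4', []),
--     ('num_traits', 'num-traits', '0.2', []),
--     ('once_cell', 'once_cell', '1', []),
--     ('parking_lot', 'parking_lot', '0.12', []),
--     ('pin_project', 'pin-project', '1', []),
--     ('pin_project_lite', 'pin-project-lite', '0.2', []),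
--     ('rand', 'rand', '0.8', []),
--     ('rand_core', 'rand_core', '0.6', []),
--     ('rayon', 'rayon', '1', []),
--     ('regex', 'regex', '1', []),
--     ('reqwest', 'reqwest', '0.12', ['json']),
--     ('serde', 'serde', '1', ['derive']),
--     ('serde_derive', 'serde_derive', '1', []),
--     ('serde_json', 'serde_json', '1', []),
--     ('strum', 'strum', '0.26', ['derive']),
--     ('strum_macros', 'strum', '0.26', ['derive']),
--     ('thiserror', 'thiserror', '2', []),
--     ('tokio', 'tokio', '1', ['full']),
--     ('tokio_stream', 'tokio-stream', '0.1', []),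
--     ('tokio_util', 'tokio-util', '0.7', ['full']),
--     ('tower', 'tower', '0.4', ['full']),
--     ('tower_layer', 'tower', '0.4', ['full']),
--     ('tower_service', 'tower', '0.4', ['full']),
--     ('tracing', 'tracing', '0.1', []),
--     ('tracing_subscriber', 'tracing-subscriber', '0.3', ['env-filter']),
--     ('typed_arena', 'typed-arena', '2', []),
--     ('uuid', 'uuid', '1', ['v4']),
-- ]
--
-- def _dep_line(name, version, features):
--     if features:
--         feats = ", ".join('"' + f + '"' for f in features)
--         return name + ' = { version = "' + version + '", features = [' + feats + '] }'
--     return name + ' = "' + version + '"'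
--
-- def make_cargo_toml(crates: list[str]) -> str:
--     # Walk the fixed pre-sorted table with the input crates as a membership set,
--     # rendering each selected dependency line from its structured row.
--     present = set(crates)
--     out = (
--         '[package]\n'
--         'name = "rust-example"\n'
--         'version = "0.1.0"\n'
--         'edition = "' + EDITION + '"\n'
--         '\n'
--         '[dependencies]\n'
--     )
--     for key, name, version, features in DEPS:
--         if key in present:
--             out += _dep_line(name, version, features) + "\n"
--     return out
-- ===== Notes on version B (the rewrite author's own statement) =====
-- stated objective: faster
-- what changed: B replaces the dict of ready-made dependency lines with a pre-sorted structured table of (key, crate-name, version, features) rows, walks that fixed table once with the input crates as a membership set, renders each selected row and appends it to the output string directly, instead of sorting the deduplicated input, probing the dict per element and joining a collected list at the end; the input list is never sorted.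
import Mathlib
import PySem

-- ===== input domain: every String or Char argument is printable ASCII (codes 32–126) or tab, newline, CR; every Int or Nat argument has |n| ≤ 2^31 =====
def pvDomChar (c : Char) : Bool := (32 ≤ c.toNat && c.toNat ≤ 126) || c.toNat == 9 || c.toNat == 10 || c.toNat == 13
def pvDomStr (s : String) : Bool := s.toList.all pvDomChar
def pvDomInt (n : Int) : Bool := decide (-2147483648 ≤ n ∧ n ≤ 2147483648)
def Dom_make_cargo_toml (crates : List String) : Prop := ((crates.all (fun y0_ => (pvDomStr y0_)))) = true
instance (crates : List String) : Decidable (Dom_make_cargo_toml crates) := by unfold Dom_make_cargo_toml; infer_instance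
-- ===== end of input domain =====

-- B stores the dependency table as pre-sorted structured rows (key, crate-name, version,
-- features), renders each selected row and appends it to the output string directly,
-- with the input crates as a membership set, instead of sorting the deduplicated input,
-- probing a dict of ready-made lines and joining a list at the end (objective: faster).

-- ===== PORT A =====
def pvEDITION : String := "2021"

def pvCRATE_MAP : PySem.Dict String String := PySem.Dict.ofList [
  ("tokio", "tokio = { version = \"1\", features = [\"full\"] }"),
  ("tokio_util", "tokio-util = { version = \"0.7\", features = [\"full\"] }"),
  ("tokio_stream", "tokio-stream = \"0.1\""),
  ("futures", "futures = \"0.3\""),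
  ("futures_util", "futures-util = \"0.3\""),
  ("async_trait", "async-trait = \"0.1\""),
  ("pin_project", "pin-project = \"1\""),
  ("pin_project_lite", "pin-project-lite = \"0.2\""),
  ("serde", "serde = { version = \"1\", features = [\"derive\"] }"),
  ("serde_json", "serde_json = \"1\""),
  ("serde_derive", "serde_derive = \"1\""),
  ("thiserror", "thiserror = \"2\""),
  ("anyhow", "anyhow = \"1\""),
  ("rayon", "rayon = \"1\""),
  ("crossbeam", "crossbeam = \"0.8\""),
  ("crossbeam_channel", "crossbeam-channel = \"0.5\""),
  ("crossbeam_utils", "crossbeam-utils = \"0.8\""),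
  ("parking_lot", "parking_lot = \"0.12\""),
  ("dashmap", "dashmap = \"6\""),
  ("once_cell", "once_cell = \"1\""),
  ("lazy_static", "lazy_static = \"1\""),
  ("rand", "rand = \"0.8\""),
  ("rand_core", "rand_core = \"0.6\""),
  ("regex", "regex = \"1\""),
  ("tracing", "tracing = \"0.1\""),
  ("tracing_subscriber", "tracing-subscriber = { version = \"0.3\", features = [\"env-filter\"] }"),
  ("log", "log = \"0.4\""),
  ("env_logger", "env_logger = \"0.11\""),
  ("tower", "tower = { version = \"0.4\", features = [\"full\"] }"),
  ("tower_service", "tower = { version = \"0.4\", features = [\"full\"] }"),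
  ("tower_layer", "tower = { version = \"0.4\", features = [\"full\"] }"),
  ("hyper", "hyper = { version = \"1\", features = [\"full\"] }"),
  ("axum", "axum = \"0.7\""),
  ("reqwest", "reqwest = { version = \"0.12\", features = [\"json\"] }"),
  ("bytes", "bytes = \"1\""),
  ("byteorder", "byteorder = \"1\""),
  ("itertools", "itertools = \"0.13\""),
  ("num_traits", "num-traits = \"0.2\""),
  ("num_derive", "num-derive = \"0.4\""),
  ("indexmap", "indexmap = \"2\""),
  ("typed_arena", "typed-arena = \"2\""),
  ("derive_more", "derive_more = { version = \"1\", features = [\"full\"] }"),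
  ("strum", "strum = { version = \"0.26\", features = [\"derive\"] }"),
  ("strum_macros", "strum = { version = \"0.26\", features = [\"derive\"] }"),
  ("clap", "clap = { version = \"4\", features = [\"derive\"] }"),
  ("chrono", "chrono = \"0.4\""),
  ("uuid", "uuid = { version = \"1\", features = [\"v4\"] }"),
  ("libc", "libc = \"0.2\"")]

def make_cargo_toml (crates : List String) : String :=
  let lines : List String := [
    "[package]",
    "name = \"rust-example\"",
    "version = \"0.1.0\"",
    PySem.Str.join "" ["edition = \"", pvEDITION, "\""],
    "",
    "[dependencies]"]
  let lines := (PySem.List.sorted (PySem.Set.ofList crates) (fun x => x) false).foldl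
    (fun acc crate =>
      if pvCRATE_MAP.contains crate then acc ++ [pvCRATE_MAP.getD crate ""] else acc) lines
  PySem.Str.join "" [PySem.Str.join "\n" lines, "\n"]

-- ===== PORT B =====
-- the table of Source B: rows (key, crate-name, version, features), pre-sorted by key
def pvDEPS : List (String × String × String × List String) := [
  ("anyhow", "anyhow", "1", []),
  ("async_trait", "async-trait", "0.1", []),
  ("axum", "axum", "0.7", []),
  ("byteorder", "byteorder", "1", []),
  ("bytes", "bytes", "1", []),
  ("chrono", "chrono", "0.4", []),
  ("clap", "clap", "4", ["derive"]),
  ("crossbeam", "crossbeam", "0.8", []),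
  ("crossbeam_channel", "crossbeam-channel", "0.5", []),
  ("crossbeam_utils", "crossbeam-utils", "0.8", []),
  ("dashmap", "dashmap", "6", []),
  ("derive_more", "derive_more", "1", ["full"]),
  ("env_logger", "env_logger", "0.11", []),
  ("futures", "futures", "0.3", []),
  ("futures_util", "futures-util", "0.3", []),
  ("hyper", "hyper", "1", ["full"]),
  ("indexmap", "indexmap", "2", []),
  ("itertools", "itertools", "0.13", []),
  ("lazy_static", "lazy_static", "1", []),
  ("libc", "libc", "0.2", []),
  ("log", "log", "0.4", []),
  ("num_derive", "num-derive", "0.4", []),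
  ("num_traits", "num-traits", "0.2", []),
  ("once_cell", "once_cell", "1", []),
  ("parking_lot", "parking_lot", "0.12", []),
  ("pin_project", "pin-project", "1", []),
  ("pin_project_lite", "pin-project-lite", "0.2", []),
  ("rand", "rand", "0.8", []),
  ("rand_core", "rand_core", "0.6", []),
  ("rayon", "rayon", "1", []),
  ("regex", "regex", "1", []),
  ("reqwest", "reqwest", "0.12", ["json"]),
  ("serde", "serde", "1", ["derive"]),
  ("serde_derive", "serde_derive", "1", []),
  ("serde_json", "serde_json", "1", []),
  ("strum", "strum", "0.26", ["derive"]),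
  ("strum_macros", "strum", "0.26", ["derive"]),
  ("thiserror", "thiserror", "2", []),
  ("tokio", "tokio", "1", ["full"]),
  ("tokio_stream", "tokio-stream", "0.1", []),
  ("tokio_util", "tokio-util", "0.7", ["full"]),
  ("tower", "tower", "0.4", ["full"]),
  ("tower_layer", "tower", "0.4", ["full"]),
  ("tower_service", "tower", "0.4", ["full"]),
  ("tracing", "tracing", "0.1", []),
  ("tracing_subscriber", "tracing-subscriber", "0.3", ["env-filter"]),
  ("typed_arena", "typed-arena", "2", []),
  ("uuid", "uuid", "1", ["v4"])]

def pvDepLine (name : String) (version : String) (features : List String) : String :=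
  if features ≠ [] then
    PySem.Str.join "" [name, " = { version = \"", version, "\", features = [",
      PySem.Str.join ", " (features.map (fun f => PySem.Str.join "" ["\"", f, "\""])), "] }"]
  else
    PySem.Str.join "" [name, " = \"", version, "\""]

def make_cargo_toml_alt (crates : List String) : String :=
  let present : PySem.Set String := PySem.Set.ofList crates
  let out : String := PySem.Str.join ""
    ["[package]\nname = \"rust-example\"\nversion = \"0.1.0\"\nedition = \"",
     pvEDITION, "\"\n\n[dependencies]\n"]
  pvDEPS.foldl
    (fun out e =>
      if PySem.Set.contains present e.1 then
        PySem.Str.join "" [out, pvDepLine e.2.1 e.2.2.1 e.2.2.2, "\n"]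
      else out)
    out

-- ===== PRECONDITION & SPEC =====
def Spec_make_cargo_toml (crates : List String) (out : String) : Prop := out = make_cargo_toml_alt crates
instance (crates : List String) (out : String) : Decidable (Spec_make_cargo_toml crates out) := by unfold Spec_make_cargo_toml; infer_instance

-- ===== CLAIM =====
def Claim_equal_make_cargo_toml : Prop := ∀ (crates : List String), Dom_make_cargo_toml crates → Spec_make_cargo_toml crates (make_cargo_toml crates)

-- ===== LEMMAS AND PROOFS =====

-- the sorted, map-filtered input equals the present-filtered sorted key list
set_option maxRecDepth 8192 in
theorem pv_filter_sorted_eq (crates : List String) :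
    (PySem.List.sorted (PySem.Set.ofList crates) (fun x => x) false).filter
      (fun c => pvCRATE_MAP.contains c)
    = (PySem.List.sorted pvCRATE_MAP.keys (fun x => x) false).filter
      (fun name => PySem.Set.contains (PySem.Set.ofList crates) name) := by
  have hL1lt :
      ((PySem.List.sorted (PySem.Set.ofList crates) (fun x => x) false).filter
        (fun c => pvCRATE_MAP.contains c)).Pairwise (· < ·) :=
    (PySem.List.sorted_ofList_pairwise_lt crates).filter _
  have hKlt : (PySem.List.sorted pvCRATE_MAP.keys (fun x => x) false).Pairwise (· < ·) :=
    ((PySem.List.sorted_pairwise _ _).and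
      ((PySem.List.sorted_perm pvCRATE_MAP.keys (fun x => x) false).symm.nodup
        (PySem.Dict.nodup_keys_ofList _))).imp (fun h => lt_of_le_of_ne h.1 h.2)
  have hL2lt :
      ((PySem.List.sorted pvCRATE_MAP.keys (fun x => x) false).filter
        (fun name => PySem.Set.contains (PySem.Set.ofList crates) name)).Pairwise (· < ·) :=
    hKlt.filter _
  have hperm :
      ((PySem.List.sorted pvCRATE_MAP.keys (fun x => x) false).filter
        (fun name => PySem.Set.contains (PySem.Set.ofList crates) name)).Perm
      ((PySem.List.sorted (PySem.Set.ofList crates) (fun x => x) false).filter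
        (fun c => pvCRATE_MAP.contains c)) := by
    rw [List.perm_ext_iff_of_nodup (hL2lt.imp ne_of_lt) (hL1lt.imp ne_of_lt)]
    intro a
    simp only [List.mem_filter, PySem.List.mem_sorted, PySem.Set.mem_ofList,
      PySem.Set.contains_iff, PySem.Dict.contains_iff_mem_keys]
    tauto
  calc
    (PySem.List.sorted (PySem.Set.ofList crates) (fun x => x) false).filter
        (fun c => pvCRATE_MAP.contains c)
      = PySem.List.sorted
          ((PySem.List.sorted (PySem.Set.ofList crates) (fun x => x) false).filter
            (fun c => pvCRATE_MAP.contains c)) (fun x => x) false :=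
        (PySem.List.sorted_eq_self_of_pairwise _ _ (hL1lt.imp le_of_lt)).symm
    _ = (PySem.List.sorted pvCRATE_MAP.keys (fun x => x) false).filter
          (fun name => PySem.Set.contains (PySem.Set.ofList crates) name) :=
        PySem.List.sorted_eq_of_perm_of_pairwise_lt _ _ _ hperm hL2lt

-- the sorted dict keys are exactly the first components of B's pre-sorted table
set_option maxRecDepth 16384 in
theorem pv_sorted_keys_eq :
    PySem.List.sorted pvCRATE_MAP.keys (fun x => x) false = pvDEPS.map (fun e => e.1) := by
  have hperm : (pvDEPS.map (fun e => e.1)).Perm pvCRATE_MAP.keys :=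
    (by decide : pvCRATE_MAP.keys.Perm (pvDEPS.map (fun e => e.1))).symm
  have hchars : pvDEPS.Pairwise (fun a b => a.1.toList < b.1.toList) :=
    List.pairwise_map.mp
      (by decide : (pvDEPS.map (fun e => e.1.toList)).Pairwise (· < ·))
  have hpair : (pvDEPS.map (fun e => e.1)).Pairwise (· ≤ ·) :=
    List.pairwise_map.mpr (hchars.imp (fun h => le_of_lt (String.lt_iff_toList_lt.mpr h)))
  exact PySem.List.sorted_id_eq_of_perm_of_pairwise _ _ hperm hpair

-- each table row renders to the dict's ready-made line for its key
set_option maxRecDepth 16384 in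
theorem pv_rows_eq :
    pvDEPS.map (fun e => pvCRATE_MAP.getD e.1 "")
    = pvDEPS.map (fun e => pvDepLine e.2.1 e.2.2.1 e.2.2.2) := by
  decide

-- map equality gives pointwise equality on members
theorem pv_map_eq_forall {α β : Type} (l : List α) (f g : α → β)
    (h : l.map f = l.map g) : ∀ e ∈ l, f e = g e := by
  induction l with
  | nil => intro e he; cases he
  | cons a rest ih =>
    simp only [List.map_cons, List.cons.injEq] at h
    intro e he
    rcases List.mem_cons.mp he with rfl | hm
    · exact h.1
    · exact ih h.2 e hm

-- sep=[] join is flatten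
theorem pv_join_nil_flatten (l : List (List Char)) :
    PySem.Chars.join [] l = l.flatten := by
  induction l with
  | nil => simp [PySem.Chars.join_nil]
  | cons a rest ih =>
    cases rest with
    | nil => simp [PySem.Chars.join_singleton]
    | cons b r =>
      rw [PySem.Chars.join_cons_cons]
      simp [ih]

-- '\n'.join(xs) + '\n' over a nonempty list = concatenation of each element + '\n'
theorem pv_join_nl (a : List Char) (L : List (List Char)) :
    PySem.Chars.join ['\n'] (a :: L) ++ ['\n']
    = a ++ ['\n'] ++ L.flatMap (fun s => s ++ ['\n']) := by
  induction L generalizing a with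
  | nil => simp [PySem.Chars.join_singleton]
  | cons b r ih =>
    rw [PySem.Chars.join_cons_cons]
    simp only [List.append_assoc]
    rw [ih b]
    simp

-- B's fold, characterized on char lists
theorem pv_foldB {α : Type} (l : List α) (p : α → Bool) (g : α → String) (out : String) :
    (l.foldl (fun out e => if p e then PySem.Str.join "" [out, g e, "\n"] else out) out).toList
    = out.toList ++ (l.filter p).flatMap (fun e => (g e).toList ++ ['\n']) := by
  induction l generalizing out with
  | nil => simp
  | cons e rest ih =>
    by_cases hp : p e
    · simp only [List.foldl_cons, hp, if_pos, List.filter_cons_of_pos hp, List.flatMap_cons]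
      rw [ih]
      simp [PySem.Str.toList_join, pv_join_nil_flatten]
    · simp only [List.foldl_cons, hp, if_neg, Bool.false_eq_true, not_false_iff,
        List.filter_cons_of_neg, ih]

-- flatMap congruence over members
theorem pv_flatMap_congr {α β : Type} (l : List α) (f g : α → List β)
    (h : ∀ e ∈ l, f e = g e) : l.flatMap f = l.flatMap g := by
  induction l with
  | nil => rfl
  | cons a rest ih =>
    simp only [List.flatMap_cons, h a List.mem_cons_self,
      ih (fun e he => h e (List.mem_cons_of_mem a he))]

-- A's whole output on char lists: the header chars, then each dependency line followed by '\n'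
theorem pv_A_chars (L : List String) :
    (PySem.Str.join "" [PySem.Str.join "\n"
      (["[package]", "name = \"rust-example\"", "version = \"0.1.0\"",
        PySem.Str.join "" ["edition = \"", pvEDITION, "\""], "", "[dependencies]"] ++ L), "\n"]).toList
    = "[package]\nname = \"rust-example\"\nversion = \"0.1.0\"\nedition = \"2021\"\n\n[dependencies]\n".toList
      ++ L.flatMap (fun s => s.toList ++ ['\n']) := by
  have hnl : "\n".toList = ['\n'] := rfl
  have hempty : "".toList = ([] : List Char) := rfl
  simp only [PySem.Str.toList_join, hnl, hempty, List.map_cons, List.map_nil,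
    List.cons_append, List.nil_append]
  rw [pv_join_nil_flatten]
  simp only [List.flatten_cons, List.flatten_nil, List.append_nil]
  rw [pv_join_nl]
  simp only [List.flatMap_cons, List.flatMap_map]
  generalize L.flatMap (fun s => s.toList ++ ['\n']) = r
  simp only [← List.append_assoc]
  congr 1

-- ===== VERDICT =====
set_option maxRecDepth 8192 in
theorem make_cargo_toml_spec : Claim_equal_make_cargo_toml := by
  intro crates _
  unfold Spec_make_cargo_toml make_cargo_toml make_cargo_toml_alt
  dsimp only
  rw [PySem.List.foldl_append_if, pv_filter_sorted_eq, pv_sorted_keys_eq]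
  apply String.toList_inj.mp
  rw [pv_A_chars,
    pv_foldB pvDEPS (fun e => PySem.Set.contains (PySem.Set.ofList crates) e.1)
      (fun e => pvDepLine e.2.1 e.2.2.1 e.2.2.2) _]
  rw [show (PySem.Str.join ""
      ["[package]\nname = \"rust-example\"\nversion = \"0.1.0\"\nedition = \"",
       pvEDITION, "\"\n\n[dependencies]\n"]).toList
    = "[package]\nname = \"rust-example\"\nversion = \"0.1.0\"\nedition = \"2021\"\n\n[dependencies]\n".toList
    from rfl]
  congr 1
  rw [List.filter_map, List.map_map, List.flatMap_map]
  simp only [Function.comp]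
  apply pv_flatMap_congr
  intro e he
  rw [pv_map_eq_forall pvDEPS _ _ pv_rows_eq e (List.mem_of_mem_filter he)]
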